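-- pv_equiv track=rewrite | github.com/xiaobingling93-pixel/Ascend-mind-cluster | component/ascend-faultdiag/src/ascend_fd/pkg/parse/blacklist/blacklist_op.py | _delete_items_show
-- ===== SOURCE A (Python) =====
-- def _delete_items_show(ids: list, blacklist: list):
--     """
--     delete items return
--     :param ids: int array like [1,2,3]
--     :return: formatted string as show function
--     1. xxxx, xxxx
--     """
--     id_set = set(ids)
--     return_string_list = []
--     for i, blacklist_item in enumerate(blacklist):
--         if i in id_set:
--             return_string_list.append("{}. {}".format(str(i), ', '.join(blacklist_item)))
--     return_string = "\n".join(return_string_list)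
--     return "\n{}\n".format(return_string)
-- ===== SOURCE B (Python) =====
-- def _delete_items_show(ids: list, blacklist: list):
--     valid = sorted(i for i in set(ids) if 0 <= i < len(blacklist))
--     parts = ["{}. {}".format(str(i), ', '.join(blacklist[i])) for i in valid]
--     return "\n{}\n".format("\n".join(parts))
-- ===== Notes on version B (the rewrite author's own statement) =====
-- stated objective: alternative
-- what changed: B drives the loop from the selected ids (deduplicated, range-filtered, sorted) and indexes into blacklist directly, instead of A's full enumerate scan with a membership test.
import Mathlib
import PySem

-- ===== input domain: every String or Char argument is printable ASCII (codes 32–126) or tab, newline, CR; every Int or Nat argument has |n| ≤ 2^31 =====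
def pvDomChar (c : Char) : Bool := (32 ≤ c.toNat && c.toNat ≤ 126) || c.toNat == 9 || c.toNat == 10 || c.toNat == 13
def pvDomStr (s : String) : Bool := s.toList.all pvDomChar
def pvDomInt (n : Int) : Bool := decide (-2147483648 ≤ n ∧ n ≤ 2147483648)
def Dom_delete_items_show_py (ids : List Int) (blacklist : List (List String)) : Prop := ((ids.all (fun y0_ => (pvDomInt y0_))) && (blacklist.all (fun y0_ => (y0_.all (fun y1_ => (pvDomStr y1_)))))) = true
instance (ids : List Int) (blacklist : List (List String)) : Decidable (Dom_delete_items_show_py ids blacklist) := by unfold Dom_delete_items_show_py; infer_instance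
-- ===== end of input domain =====

-- B builds the output from the selected ids (dedup, range-filter, sort, index into blacklist)
-- instead of A's full enumerate scan with a set-membership test; alternative decomposition, same cost class.

-- ===== PORT A =====
def delete_items_show_py (ids : List Int) (blacklist : List (List String)) : String :=
  let id_set : PySem.Set Int := PySem.Set.ofList ids
  let return_string_list : List String :=
    (PySem.List.enumerate blacklist 0).foldl
      (fun acc p =>
        if PySem.Set.contains id_set p.1 then
          acc ++ [PySem.Int.toStr p.1 ++ ". " ++ PySem.Str.join ", " p.2]
        else acc) []
  let return_string := PySem.Str.join "\n" return_string_list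
  "\n" ++ return_string ++ "\n"

-- ===== PORT B =====
def delete_items_show_py_alt (ids : List Int) (blacklist : List (List String)) : String :=
  let valid : List Int :=
    PySem.List.sorted
      ((PySem.Set.ofList ids).filter (fun i => decide (0 ≤ i ∧ i < (blacklist.length : Int))))
      (fun x => x) false
  let parts : List String :=
    valid.map (fun i =>
      PySem.Int.toStr i ++ ". " ++ PySem.Str.join ", " (PySem.List.pyGetD blacklist i []))
  "\n" ++ PySem.Str.join "\n" parts ++ "\n"

-- ===== PRECONDITION & SPEC =====
def Spec_delete_items_show_py (ids : List Int) (blacklist : List (List String)) (out : String) : Prop := out = delete_items_show_py_alt ids blacklist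
instance (ids : List Int) (blacklist : List (List String)) (out : String) : Decidable (Spec_delete_items_show_py ids blacklist out) := by unfold Spec_delete_items_show_py; infer_instance

-- ===== CLAIM (what is proved, stated in full; the proofs are below) =====
def Claim_equal_delete_items_show_py : Prop := ∀ (ids : List Int) (blacklist : List (List String)), Dom_delete_items_show_py ids blacklist → Spec_delete_items_show_py ids blacklist (delete_items_show_py ids blacklist)

-- ===== LEMMAS AND PROOFS =====

-- the selected (index, row) pairs of A, projected to indices, are exactly B's sorted valid ids
theorem pv_fst_filter_enumerate_eq_valid (ids : List Int) (blacklist : List (List String)) :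
    ((PySem.List.enumerate blacklist 0).filter
        (fun p => PySem.Set.contains (PySem.Set.ofList ids) p.1)).map Prod.fst =
    PySem.List.sorted
      ((PySem.Set.ofList ids).filter (fun i => decide (0 ≤ i ∧ i < (blacklist.length : Int))))
      (fun x => x) false := by
  symm
  apply PySem.List.sorted_eq_of_perm_of_pairwise_lt
  · have nd1 : (((PySem.List.enumerate blacklist 0).filter
        (fun p => PySem.Set.contains (PySem.Set.ofList ids) p.1)).map Prod.fst).Nodup := by
      have hp := (PySem.List.pairwise_lt_enumerate (xs := blacklist) (s := 0)).filter
        (fun p => PySem.Set.contains (PySem.Set.ofList ids) p.1)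
      exact (List.pairwise_map.mpr hp).imp ne_of_lt
    have nd2 : ((PySem.Set.ofList ids).filter
        (fun i => decide (0 ≤ i ∧ i < (blacklist.length : Int)))).Nodup :=
      (PySem.Set.nodup_ofList ids).filter _
    refine (List.perm_ext_iff_of_nodup nd1 nd2).mpr ?_
    intro a
    simp only [List.mem_map, List.mem_filter, PySem.List.mem_enumerate_iff,
      PySem.Set.contains_iff, decide_eq_true_eq]
    constructor
    · rintro ⟨p, ⟨⟨k, hk, rfl⟩, hmem⟩, rfl⟩
      exact ⟨hmem, by push_cast; omega, by push_cast; omega⟩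
    · rintro ⟨hmem, h0, hn⟩
      have hcast : ((a.toNat : Int)) = a := Int.toNat_of_nonneg h0
      refine ⟨((0 : Int) + a.toNat, blacklist[a.toNat]'(by omega)), ⟨⟨a.toNat, by omega, rfl⟩, ?_⟩, ?_⟩
      · simpa [hcast] using hmem
      · simp [hcast]
  · have hp := (PySem.List.pairwise_lt_enumerate (xs := blacklist) (s := 0)).filter
      (fun p => PySem.Set.contains (PySem.Set.ofList ids) p.1)
    exact List.pairwise_map.mpr hp

-- each selected pair's row is blacklist indexed at its first component
theorem pv_snd_eq_pyGetD (ids : List Int) (blacklist : List (List String)) :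
    ∀ p ∈ (PySem.List.enumerate blacklist 0).filter
        (fun p => PySem.Set.contains (PySem.Set.ofList ids) p.1),
      p.2 = PySem.List.pyGetD blacklist p.1 [] := by
  intro p hp
  have hmem := List.mem_of_mem_filter hp
  rw [PySem.List.mem_enumerate_iff] at hmem
  obtain ⟨k, hk, rfl⟩ := hmem
  simp [PySem.List.pyGetD_natCast, hk]

-- ===== VERDICT (by name: the statement is the Claim_ definition above) =====
theorem delete_items_show_py_spec : Claim_equal_delete_items_show_py := by
  intro ids blacklist _
  unfold Spec_delete_items_show_py delete_items_show_py delete_items_show_py_alt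
  simp only [PySem.List.foldl_append_if, List.nil_append]
  have h1 := pv_fst_filter_enumerate_eq_valid ids blacklist
  have h2 := pv_snd_eq_pyGetD ids blacklist
  rw [← h1, List.map_map]
  congr 2
  refine congrArg _ (List.map_congr_left (fun p hp => ?_))
  simp only [Function.comp_apply, h2 p hp]
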